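-- pv_equiv track=rewrite | github.com/srelling/grayt_chess_puzzles | find_grayt_puzzles.py | change_piece_color
-- ===== SOURCE A (Python) =====
-- def change_piece_color(fen, index):
--     pieces = 'rnbqpRNBQP'
--     count = 0
--     new_fen = ''
--     for char in fen.split()[0]:
--         if char in pieces:
--             if count == index:
--                 char = char.swapcase()
--             count += 1
--         new_fen += char
--
--     for part in fen.split()[1:]:
--         new_fen += ' ' + part
--     return new_fen
-- ===== SOURCE B (Python) =====
-- def change_piece_color(fen, index):
--     parts = fen.split()
--     board = parts[0]
--     positions = [i for i, c in enumerate(board) if c in 'rnbqpRNBQP']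
--     if 0 <= index < len(positions):
--         pos = positions[index]
--         board = board[:pos] + board[pos].swapcase() + board[pos+1:]
--     return ' '.join([board] + parts[1:])
-- ===== Notes on version B (the rewrite author's own statement) =====
-- stated objective: simpler
-- what changed: Replaces A's single interleaved counting-and-appending scan (plus a second split pass for the tail) with locate-then-splice: build the index table of piece positions once, splice the swapped character in with slices, and reassemble with ' '.join.
import Mathlib
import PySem

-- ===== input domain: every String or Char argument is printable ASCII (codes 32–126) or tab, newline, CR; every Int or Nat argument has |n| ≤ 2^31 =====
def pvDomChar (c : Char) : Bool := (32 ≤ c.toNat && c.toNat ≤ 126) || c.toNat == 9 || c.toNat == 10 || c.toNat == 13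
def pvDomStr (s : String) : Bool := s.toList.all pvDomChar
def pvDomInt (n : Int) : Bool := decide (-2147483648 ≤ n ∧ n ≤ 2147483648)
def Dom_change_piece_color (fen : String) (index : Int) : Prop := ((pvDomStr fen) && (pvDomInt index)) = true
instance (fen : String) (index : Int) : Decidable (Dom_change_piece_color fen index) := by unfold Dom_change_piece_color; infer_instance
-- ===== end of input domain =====

-- B changes the decomposition: locate the n-th piece via an index table, splice by slicing, join — not faster, simpler.
-- Shared helpers (the constant 'rnbqpRNBQP' and single-char swapcase, exact for ASCII letters)
def pvPieces : List Char := ['r', 'n', 'b', 'q', 'p', 'R', 'N', 'B', 'Q', 'P']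

def pvSwapcase (c : Char) : Char :=
  if PySem.Chars.isupper c then PySem.Chars.lowerChar c
  else if PySem.Chars.islower c then PySem.Chars.upperChar c
  else c

-- ===== PORT A =====
def change_piece_color (fen : String) (index : Int) : String :=
  let parts := PySem.Str.split₀ fen
  -- fen.split()[0]: raises IndexError when the split is empty; excluded by Pre_
  let board := ((PySem.List.pyGet? parts 0).getD "").toList
  let st := board.foldl
    (fun (st : Int × List Char) ch =>
      if ch ∈ pvPieces then
        (st.1 + 1, st.2 ++ [if st.1 = index then pvSwapcase ch else ch])
      else
        (st.1, st.2 ++ [ch]))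
    ((0 : Int), ([] : List Char))
  let rest := PySem.List.slice parts (some 1) none
  String.ofList (rest.foldl (fun acc part => acc ++ ' ' :: part.toList) st.2)

-- ===== PORT B =====
def change_piece_color_alt (fen : String) (index : Int) : String :=
  let parts := PySem.Str.split₀ fen
  let board := ((PySem.List.pyGet? parts 0).getD "").toList
  let positions := ((PySem.List.enumerate board).filter (fun p => p.2 ∈ pvPieces)).map (·.1)
  let board2 :=
    if 0 ≤ index ∧ index < (positions.length : Int) then
      let pos := (PySem.List.pyGet? positions index).getD 0
      PySem.List.slice board none (some pos)
        ++ [pvSwapcase ((PySem.List.pyGet? board pos).getD ' ')]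
        ++ PySem.List.slice board (some (pos + 1)) none
    else board
  PySem.Str.join " " (String.ofList board2 :: PySem.List.slice parts (some 1) none)

-- ===== PRECONDITION & SPEC =====
-- Pre_ excludes exactly the inputs where Python A raises IndexError (fen.split()[0] on a
-- whitespace-only/empty fen; B raises the same way there).
def Pre_change_piece_color (fen : String) (index : Int) : Prop :=
  fen.toList.any (fun c => !PySem.Chars.isspace c) = true
instance (fen : String) (index : Int) : Decidable (Pre_change_piece_color fen index) := by
  unfold Pre_change_piece_color; infer_instance

def pvWitness_change_piece_color : String × Int := ("rn1/8 w - 0", 1)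

def Spec_change_piece_color (fen : String) (index : Int) (out : String) : Prop :=
  out = change_piece_color_alt fen index
instance (fen : String) (index : Int) (out : String) : Decidable (Spec_change_piece_color fen index out) := by
  unfold Spec_change_piece_color; infer_instance

-- ===== CLAIM (what is proved, stated in full; the proofs are below) =====
def Claim_equal_change_piece_color : Prop :=
  ∀ (fen : String) (index : Int), Dom_change_piece_color fen index →
    Pre_change_piece_color fen index →
    Spec_change_piece_color fen index (change_piece_color fen index)

-- ===== LEMMAS AND PROOFS =====

-- canonical recursive form: swap the piece numbered idx (counting from the front)
def pvCanon : List Char → Int → List Char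
  | [], _ => []
  | ch :: rest, idx =>
    if ch ∈ pvPieces then (if idx = 0 then pvSwapcase ch else ch) :: pvCanon rest (idx - 1)
    else ch :: pvCanon rest idx

-- natural-number positions of the pieces
def pvPosN : List Char → List Nat
  | [] => []
  | ch :: rest => (if ch ∈ pvPieces then [0] else []) ++ (pvPosN rest).map (· + 1)

theorem pvCanon_neg (cs : List Char) : ∀ idx : Int, idx < 0 → pvCanon cs idx = cs := by
  induction cs with
  | nil => intro idx _; rfl
  | cons ch rest ih =>
    intro idx h
    simp only [pvCanon]
    split_ifs with hp hz
    · omega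
    · rw [ih _ (by omega)]
    · rw [ih _ h]

theorem pvCanon_ge (cs : List Char) : ∀ idx : Int, ((pvPosN cs).length : Int) ≤ idx → pvCanon cs idx = cs := by
  induction cs with
  | nil => intro idx _; rfl
  | cons ch rest ih =>
    intro idx h
    simp only [pvPosN, List.length_append, List.length_map] at h
    simp only [pvCanon]
    by_cases hp : ch ∈ pvPieces
    · simp only [hp, if_true] at h ⊢
      simp only [List.length_cons, List.length_nil] at h
      have hz : ¬ (idx = 0) := by omega
      rw [if_neg hz, ih _ (by omega)]
    · simp only [hp, if_false] at h ⊢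
      simp only [List.length_nil, Nat.zero_add] at h
      rw [ih _ (by omega)]

theorem pvPosN_lt (cs : List Char) : ∀ m ∈ pvPosN cs, m < cs.length := by
  induction cs with
  | nil => simp [pvPosN]
  | cons ch rest ih =>
    intro m hm
    simp only [pvPosN, List.mem_append, List.mem_map] at hm
    rcases hm with hm | ⟨n, hn, rfl⟩
    · split_ifs at hm with hp
      · simp at hm; subst hm; simp
      · simp at hm
    · have := ih n hn; simp; omega

-- A's loop computes pvCanon
theorem pvALoop_eq (index : Int) (cs : List Char) :
    ∀ (c : Int) (acc : List Char),
      (cs.foldl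
        (fun (st : Int × List Char) ch =>
          if ch ∈ pvPieces then
            (st.1 + 1, st.2 ++ [if st.1 = index then pvSwapcase ch else ch])
          else
            (st.1, st.2 ++ [ch])) (c, acc)).2 = acc ++ pvCanon cs (index - c) := by
  induction cs with
  | nil => intro c acc; simp [pvCanon]
  | cons ch rest ih =>
    intro c acc
    simp only [List.foldl_cons]
    by_cases hp : ch ∈ pvPieces
    · simp only [hp, if_true, pvCanon]
      rw [ih (c + 1)]
      have h1 : index - (c + 1) = (index - c) - 1 := by omega
      by_cases hz : c = index
      · rw [if_pos hz, if_pos (show index - c = 0 by omega), h1]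
        simp
      · rw [if_neg hz, if_neg (show ¬ (index - c = 0) by omega), h1]
        simp
    · simp only [hp, if_false, pvCanon]
      rw [ih c]
      simp

-- enumerate shift
theorem pvEnum_shift (cs : List Char) : ∀ s : Int,
    PySem.List.enumerate cs (s + 1) = (PySem.List.enumerate cs s).map (fun p => (p.1 + 1, p.2)) := by
  induction cs with
  | nil => intro s; simp [PySem.List.enumerate_nil]
  | cons ch rest ih =>
    intro s
    rw [PySem.List.enumerate_cons, PySem.List.enumerate_cons, List.map_cons, ih (s + 1)]

-- filtering a shifted enumeration, then taking indices, shifts the indices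
theorem pvFilterShift (l : List (Int × Char)) :
    ((l.map (fun p => (p.1 + 1, p.2))).filter (fun p => decide (p.2 ∈ pvPieces))).map (·.1)
      = ((l.filter (fun p => decide (p.2 ∈ pvPieces))).map (·.1)).map (· + 1) := by
  simp only [List.filter_map, List.map_map]
  rfl

theorem pvCastShift (l : List Nat) :
    (l.map (Nat.cast : Nat → Int)).map (· + 1) = (l.map (· + 1)).map (Nat.cast : Nat → Int) := by
  simp only [List.map_map]
  apply List.map_congr_left
  intro a _
  simp only [Function.comp_apply]
  push_cast
  ring

-- B's positions list is pvPosN, cast to Int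
theorem pvPositions_eq (cs : List Char) :
    ((PySem.List.enumerate cs 0).filter (fun p => p.2 ∈ pvPieces)).map (·.1)
      = (pvPosN cs).map (Nat.cast : Nat → Int) := by
  induction cs with
  | nil => simp [PySem.List.enumerate_nil, pvPosN]
  | cons ch rest ih =>
    rw [PySem.List.enumerate_cons, pvEnum_shift rest 0]
    simp only [pvPosN, List.filter_cons, List.map_append]
    by_cases hp : ch ∈ pvPieces
    · simp only [hp, decide_true, if_true, List.map_cons]
      rw [pvFilterShift, ih, pvCastShift]
      rfl
    · simp only [hp, decide_false, if_false, Bool.false_eq_true]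
      rw [pvFilterShift, ih, pvCastShift]
      simp

-- splice at the k-th position equals pvCanon
theorem pvSplice_eq (cs : List Char) : ∀ (k : Nat) (hk : k < (pvPosN cs).length),
    cs.take ((pvPosN cs)[k]) ++ [pvSwapcase (cs.getD ((pvPosN cs)[k]) ' ')]
      ++ cs.drop ((pvPosN cs)[k] + 1) = pvCanon cs (k : Int) := by
  induction cs with
  | nil => intro k hk; simp [pvPosN] at hk
  | cons ch rest ih =>
    intro k hk
    by_cases hp : ch ∈ pvPieces
    · simp only [pvPosN, hp, if_pos, List.singleton_append] at hk ⊢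
      match k with
      | 0 =>
        simp [pvCanon, hp, pvCanon_neg rest (-1) (by norm_num)]
      | k + 1 =>
        simp only [List.getElem_cons_succ, List.getElem_map] at hk ⊢
        have hk' : k < (pvPosN rest).length := by simpa using hk
        have := ih k hk'
        simp only [List.take_succ_cons, List.getD_cons_succ, List.drop_succ_cons, pvCanon, hp, if_pos]
        rw [show (((k + 1 : Nat) : Int)) - 1 = (k : Int) by push_cast; ring]
        have hne : ¬ ((((k + 1 : Nat) : Int)) = 0) := by push_cast; omega
        simp only [hne, if_false]
        rw [← this]
        simp
    · simp only [pvPosN, hp, if_false] at hk ⊢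
      have hk' : k < (pvPosN rest).length := by simpa using hk
      have := ih k hk'
      simp only [pvCanon, hp, if_false]
      rw [← this]
      simp

-- join " " over char-lists as a fold
theorem pvJoin_chars (rest : List String) : ∀ cs : List Char,
    PySem.Chars.join [' '] (cs :: rest.map String.toList)
      = cs ++ rest.flatMap (fun p => ' ' :: p.toList) := by
  induction rest with
  | nil => intro cs; simp [PySem.Chars.join_singleton]
  | cons p rest ih =>
    intro cs
    rw [List.map_cons, PySem.Chars.join_cons_cons, ih]
    simp

-- B's board2 expression computes pvCanon
theorem pvBoard2_eq (board : List Char) (index : Int) :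
    (if 0 ≤ index ∧ index < ((((PySem.List.enumerate board).filter (fun p => p.2 ∈ pvPieces)).map (·.1)).length : Int) then
      PySem.List.slice board none (some ((PySem.List.pyGet? (((PySem.List.enumerate board).filter (fun p => p.2 ∈ pvPieces)).map (·.1)) index).getD 0))
        ++ [pvSwapcase ((PySem.List.pyGet? board ((PySem.List.pyGet? (((PySem.List.enumerate board).filter (fun p => p.2 ∈ pvPieces)).map (·.1)) index).getD 0)).getD ' ')]
        ++ PySem.List.slice board (some (((PySem.List.pyGet? (((PySem.List.enumerate board).filter (fun p => p.2 ∈ pvPieces)).map (·.1)) index).getD 0) + 1)) none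
    else board) = pvCanon board index := by
  rw [pvPositions_eq]
  by_cases h : 0 ≤ index ∧ index < ((((pvPosN board).map (Nat.cast : Nat → Int)).length : Nat) : Int)
  · rw [if_pos h]
    obtain ⟨h0, hlt⟩ := h
    obtain ⟨k, rfl⟩ : ∃ k : Nat, index = (k : Int) := ⟨index.toNat, by omega⟩
    have hklen : k < (pvPosN board).length := by
      simp only [List.length_map] at hlt; exact_mod_cast hlt
    have hget : (PySem.List.pyGet? ((pvPosN board).map (Nat.cast : Nat → Int)) (k : Int)).getD 0
        = (((pvPosN board)[k] : Nat) : Int) := by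
      rw [PySem.List.pyGet?_natCast]
      simp [hklen]
    rw [hget]
    have hm : (pvPosN board)[k] < board.length :=
      pvPosN_lt board _ (List.getElem_mem hklen)
    rw [PySem.List.slice_to_natCast,
        show (((pvPosN board)[k] : Nat) : Int) + 1
            = ((((pvPosN board)[k] + 1 : Nat)) : Int) by push_cast; ring,
        PySem.List.slice_from_natCast, PySem.List.pyGet?_natCast,
        List.getElem?_eq_getElem hm]
    rw [← pvSplice_eq board k hklen, List.getD_eq_getElem _ _ hm]
    rfl
  · rw [if_neg h]
    simp only [List.length_map] at h
    rcases lt_or_ge index 0 with hn | hn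
    · exact (pvCanon_neg board index hn).symm
    · have hge : ((pvPosN board).length : Int) ≤ index := by omega
      exact (pvCanon_ge board index hge).symm

set_option maxHeartbeats 1000000 in
theorem change_piece_color_spec : Claim_equal_change_piece_color := by
  intro fen index _ _
  unfold Spec_change_piece_color
  simp only [change_piece_color, change_piece_color_alt]
  rw [pvBoard2_eq]
  rw [pvALoop_eq index _ 0 []]
  rw [PySem.List.foldl_append_eq_flatMap]
  rw [← String.ofList_toList (s := PySem.Str.join " " _)]
  refine congrArg String.ofList ?_
  rw [PySem.Str.toList_join]
  simp only [List.map_cons, String.toList_ofList]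
  rw [show (" " : String).toList = [' '] from rfl]
  rw [pvJoin_chars]
  simp
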